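-- pv_equiv track=rewrite | github.com/samdol87/lecture9 | best2keys2.py | best_two_keys
-- ===== SOURCE A (Python) =====
-- def best_two_keys(dict):
--   if len(dict.keys()) < 2:
--     raise ValueError('dictionary must have at least two keys')
--   kv_pairs = []
--   for k in dict.keys():
--     if not type(k) == str:
--       raise ValueError('dictionary keys must be strings')
--     kv_pairs.append((k, dict[k]))
--   kv_pairs.sort() # sorts by first key
--   sorted_pairs = sorted(kv_pairs, key=lambda t: t[1])
--   return ((sorted_pairs[0][0], sorted_pairs[1][0]))
-- ===== SOURCE B (Python) =====
-- def best_two_keys(dict):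
--   if len(dict) < 2:
--     raise ValueError('dictionary must have at least two keys')
--   m1 = m2 = None
--   for k in dict:
--     if not type(k) == str:
--       raise ValueError('dictionary keys must be strings')
--     c = (dict[k], k)
--     if m1 is None or c < m1:
--       m1, m2 = c, m1
--     elif m2 is None or c < m2:
--       m2 = c
--   return (m1[1], m2[1])
-- ===== Notes on version B (the rewrite author's own statement) =====
-- stated objective: faster
-- what changed: replaces the sort-by-key-then-stable-sort-by-value pipeline with a single linear scan tracking the two smallest (value, key) tuples
import Mathlib
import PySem

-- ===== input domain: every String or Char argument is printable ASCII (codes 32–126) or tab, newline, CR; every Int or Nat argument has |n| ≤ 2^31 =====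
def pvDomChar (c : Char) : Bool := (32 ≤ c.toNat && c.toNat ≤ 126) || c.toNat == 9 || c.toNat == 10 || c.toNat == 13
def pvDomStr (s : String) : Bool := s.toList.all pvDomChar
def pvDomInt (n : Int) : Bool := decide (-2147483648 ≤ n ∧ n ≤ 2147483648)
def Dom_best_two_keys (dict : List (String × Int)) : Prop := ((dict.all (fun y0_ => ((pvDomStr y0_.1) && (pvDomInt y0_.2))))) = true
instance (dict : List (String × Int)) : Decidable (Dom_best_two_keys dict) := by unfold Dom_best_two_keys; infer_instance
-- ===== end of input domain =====

-- B replaces A's sort-by-key-then-stable-sort-by-value pipeline by a single linear scan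
-- tracking the two smallest (value, key) tuples (objective: faster).

-- ===== PORT A =====
def best_two_keys (dict : List (String × Int)) : String × String :=
  let d := PySem.Dict.ofList dict
  if d.size < 2 then ("", "")   -- Python raises ValueError here; excluded by Pre_
  else
    -- kv_pairs = [(k, dict[k]) for k in dict.keys()]  (the key-type check never fires: keys are String)
    let kv_pairs := d.keys.map (fun k => (k, d.getD k 0))
    -- kv_pairs.sort()  (tuples compare lexicographically: first component, then second)
    let kv_pairs2 := PySem.List.sorted2 kv_pairs (fun t => t.1) (fun t => t.2)
    -- sorted_pairs = sorted(kv_pairs, key=lambda t: t[1])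
    let sorted_pairs := PySem.List.sorted kv_pairs2 (fun t => t.2)
    match sorted_pairs with
    | a :: b :: _ => (a.1, b.1)
    | _ => ("", "")

-- ===== PORT B =====
-- one step of B's loop; state = (m1, m2); the element arrives already flipped to c = (value, key)
def pvBStep (st : Option (Int × String) × Option (Int × String)) (c : Int × String) :
    Option (Int × String) × Option (Int × String) :=
  match st with
  | (none, m2) => (some c, m2)
  | (some m1, m2) =>
    if c.1 < m1.1 ∨ (c.1 = m1.1 ∧ c.2 < m1.2) then (some c, some m1)   -- c < m1 (tuple compare)
    else
      match m2 with
      | none => (some m1, some c)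
      | some m2v =>
        if c.1 < m2v.1 ∨ (c.1 = m2v.1 ∧ c.2 < m2v.2) then (some m1, some c)   -- c < m2
        else (some m1, some m2v)

def best_two_keys_alt (dict : List (String × Int)) : String × String :=
  let d := PySem.Dict.ofList dict
  if d.size < 2 then ("", "")   -- raise ValueError
  else
    let r := d.keys.foldl (fun st k => pvBStep st (d.getD k 0, k)) (none, none)
    match r with
    | (some m1, some m2) => (m1.2, m2.2)
    | _ => ("", "")

-- ===== PRECONDITION & SPEC =====
-- A raises ValueError when the dict has fewer than two keys; exactly those inputs are excluded.
def Pre_best_two_keys (dict : List (String × Int)) : Prop :=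
  2 ≤ (PySem.Dict.ofList dict).size
instance (dict : List (String × Int)) : Decidable (Pre_best_two_keys dict) := by
  unfold Pre_best_two_keys; infer_instance
def pvWitness_best_two_keys : (List (String × Int)) := [("a", 3), ("b", 1), ("c", 1)]

def Spec_best_two_keys (dict : List (String × Int)) (out : String × String) : Prop := out = best_two_keys_alt dict
instance (dict : List (String × Int)) (out : String × String) : Decidable (Spec_best_two_keys dict out) := by unfold Spec_best_two_keys; infer_instance

-- ===== CLAIM (what is proved, stated in full; the proofs are below) =====
def Claim_equal_best_two_keys : Prop := ∀ (dict : List (String × Int)), Dom_best_two_keys dict → Pre_best_two_keys dict → Spec_best_two_keys dict (best_two_keys dict)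

-- ===== LEMMAS AND PROOFS =====

-- strict lexicographic order on (value, key) tuples, as Python compares them
def pvLt (c d : Int × String) : Prop := c.1 < d.1 ∨ (c.1 = d.1 ∧ c.2 < d.2)

-- order "by value, ties by key" on (key, value) pairs
def pvVK (a b : String × Int) : Prop := a.2 < b.2 ∨ (a.2 = b.2 ∧ a.1 < b.1)

theorem pvLt_trans {a b c : Int × String} (h1 : pvLt a b) (h2 : pvLt b c) : pvLt a c := by
  rcases h1 with h1 | ⟨e1, h1⟩ <;> rcases h2 with h2 | ⟨e2, h2⟩
  · exact Or.inl (h1.trans h2)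
  · exact Or.inl (e2 ▸ h1)
  · exact Or.inl (e1 ▸ h2)
  · exact Or.inr ⟨e1.trans e2, h1.trans h2⟩

theorem pvLt_asymm {a b : Int × String} (h1 : pvLt a b) (h2 : pvLt b a) : False := by
  rcases h1 with h1 | ⟨e1, h1⟩ <;> rcases h2 with h2 | ⟨e2, h2⟩
  · omega
  · omega
  · omega
  · exact absurd (h1.trans h2) (lt_irrefl _)

theorem pvLt_total {a b : Int × String} (h : a ≠ b) : pvLt a b ∨ pvLt b a := by
  rcases lt_trichotomy a.1 b.1 with h1 | h1 | h1
  · exact Or.inl (Or.inl h1)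
  · rcases lt_trichotomy a.2 b.2 with h2 | h2 | h2
    · exact Or.inl (Or.inr ⟨h1, h2⟩)
    · exact absurd (Prod.ext h1 h2) h
    · exact Or.inr (Or.inr ⟨h1.symm, h2⟩)
  · exact Or.inr (Or.inl h1)

theorem pv_exists_two {α : Type} (l : List α) (h : 2 ≤ l.length) : ∃ a b t, l = a :: b :: t := by
  rcases l with _ | ⟨a, _ | ⟨b, t⟩⟩
  · simp at h
  · simp at h
  · exact ⟨a, b, t, rfl⟩

-- generic: insertBy keeps a Pairwise invariant
theorem pairwise_insertBy {α : Type} (before : α → α → Bool) (P : α → α → Prop)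
    (x : α) (l : List α) (hl : l.Pairwise P)
    (h1 : ∀ y ∈ l, before x y = true → P x y)
    (h2 : ∀ y ∈ l, before x y = false → P y x)
    (h3 : ∀ y ∈ l, ∀ w ∈ l, before x y = true → P y w → P x w) :
    (PySem.List.insertBy before x l).Pairwise P := by
  induction l with
  | nil => simp [PySem.List.insertBy]
  | cons hd tl ih =>
    rw [List.pairwise_cons] at hl
    show (if before x hd then x :: hd :: tl else hd :: PySem.List.insertBy before x tl).Pairwise P
    by_cases hb : before x hd = true
    · simp only [hb, if_true]
      refine List.Pairwise.cons ?_ (List.Pairwise.cons hl.1 hl.2)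
      intro z hz
      rcases List.mem_cons.1 hz with rfl | hz
      · exact h1 z (by simp) hb
      · exact h3 hd (by simp) z (by simp [hz]) hb (hl.1 z hz)
    · rw [if_neg hb]
      refine List.Pairwise.cons ?_ ?_
      · intro z hz
        rcases (PySem.List.mem_insertBy _ _ _ _).1 hz with hzx | hz
        · subst hzx; exact h2 hd (by simp) (by simpa using hb)
        · exact hl.1 z hz
      · exact ih hl.2 (fun w hw hb' => h1 w (by simp [hw]) hb')
          (fun w hw hb' => h2 w (by simp [hw]) hb')
          (fun w hw v hv hb' hp => h3 w (by simp [hw]) v (by simp [hv]) hb' hp)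

def pvBefore1 (a b : String × Int) : Bool :=
  decide (a.1 < b.1) || (!decide (b.1 < a.1) && decide (a.2 < b.2))

theorem sorted2_eq_foldl (xs : List (String × Int)) :
    PySem.List.sorted2 xs (fun t => t.1) (fun t => t.2)
      = xs.foldl (fun acc x => PySem.List.insertBy pvBefore1 x acc) [] := rfl

-- the first sort yields a list strictly increasing in keys (the keys being distinct)
theorem pw1 (xs : List (String × Int)) :
    ∀ (acc : List (String × Int)),
      acc.Pairwise (fun a b => a.1 < b.1) →
      (∀ a ∈ acc, ∀ b ∈ xs, a.1 ≠ b.1) →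
      (xs.map Prod.fst).Nodup →
      (xs.foldl (fun acc x => PySem.List.insertBy pvBefore1 x acc) acc).Pairwise
        (fun a b => a.1 < b.1) := by
  induction xs with
  | nil => intro acc h _ _; simpa using h
  | cons x rest ih =>
    intro acc hacc hdisj hnd
    rw [List.map_cons, List.nodup_cons] at hnd
    simp only [List.foldl_cons]
    have key_of_before : ∀ y ∈ acc, pvBefore1 x y = true → x.1 < y.1 := by
      intro y hy hb
      have hne : y.1 ≠ x.1 := hdisj y hy x (List.mem_cons_self ..)
      simp only [pvBefore1, Bool.or_eq_true, Bool.and_eq_true, Bool.not_eq_eq_eq_not,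
        Bool.not_true, decide_eq_true_eq, decide_eq_false_iff_not] at hb
      rcases hb with hb | ⟨hb, _⟩
      · exact hb
      · exact lt_of_le_of_ne (not_lt.1 hb) hne.symm
    apply ih
    · apply pairwise_insertBy _ _ _ _ hacc key_of_before
      · intro y hy hb
        have hne : y.1 ≠ x.1 := hdisj y hy x (List.mem_cons_self ..)
        simp only [pvBefore1, Bool.or_eq_false_iff, Bool.and_eq_false_iff,
          decide_eq_false_iff_not] at hb
        exact lt_of_le_of_ne (not_lt.1 hb.1) hne
      · intro y hy w hw hb hp
        exact (key_of_before y hy hb).trans hp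
    · intro a ha b hb
      rcases (PySem.List.mem_insertBy _ _ _ _).1 ha with rfl | ha
      · intro hc
        exact hnd.1 (by rw [hc]; exact List.mem_map_of_mem hb)
      · exact hdisj a ha b (List.mem_cons_of_mem _ hb)
    · exact hnd.2

-- the second (stable) sort then orders pairs by value, ties broken by key
theorem pw2 (M : List (String × Int)) :
    ∀ (acc : List (String × Int)),
      acc.Pairwise pvVK →
      M.Pairwise (fun a b => a.1 < b.1) →
      (∀ a ∈ acc, ∀ b ∈ M, a.1 < b.1) →
      (M.foldl (fun acc x => PySem.List.insertBy (fun a b => decide (a.2 < b.2)) x acc) acc).Pairwise pvVK := by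
  induction M with
  | nil => intro acc h _ _; simpa using h
  | cons x rest ih =>
    intro acc hacc hM hlt
    rw [List.pairwise_cons] at hM
    simp only [List.foldl_cons]
    apply ih
    · apply pairwise_insertBy _ _ _ _ hacc
      · intro y hy hb
        exact Or.inl (by simpa using hb)
      · intro y hy hb
        have h2 : ¬ x.2 < y.2 := by simpa using hb
        have hk : y.1 < x.1 := hlt y hy x (List.mem_cons_self ..)
        rcases lt_or_eq_of_le (not_lt.1 h2) with h | h
        · exact Or.inl h
        · exact Or.inr ⟨h, hk⟩
      · intro y hy w hw hb hp
        have hxy : x.2 < y.2 := by simpa using hb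
        rcases hp with hp | ⟨hp, _⟩
        · exact Or.inl (hxy.trans hp)
        · exact Or.inl (hp ▸ hxy)
    · exact hM.2
    · intro a ha b hb
      rcases (PySem.List.mem_insertBy _ _ _ _).1 ha with rfl | ha
      · exact hM.1 b hb
      · exact hlt a ha b (List.mem_cons_of_mem _ hb)

-- reduction lemmas for pvBStep
theorem pvBStep_none (m2 : Option (Int × String)) (c : Int × String) :
    pvBStep (none, m2) c = (some c, m2) := rfl

theorem pvBStep_lt1 (m1 : Int × String) (m2 : Option (Int × String)) (c : Int × String)
    (h : pvLt c m1) : pvBStep (some m1, m2) c = (some c, some m1) := by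
  show (if c.1 < m1.1 ∨ (c.1 = m1.1 ∧ c.2 < m1.2) then _ else _) = _
  exact if_pos h

theorem pvBStep_ge1_none (m1 : Int × String) (c : Int × String)
    (h : ¬ pvLt c m1) : pvBStep (some m1, none) c = (some m1, some c) := by
  show (if c.1 < m1.1 ∨ (c.1 = m1.1 ∧ c.2 < m1.2) then _ else _) = _
  exact if_neg h

theorem pvBStep_ge1_lt2 (m1 m2v : Int × String) (c : Int × String)
    (h : ¬ pvLt c m1) (h2 : pvLt c m2v) :
    pvBStep (some m1, some m2v) c = (some m1, some c) := by
  show (if c.1 < m1.1 ∨ (c.1 = m1.1 ∧ c.2 < m1.2) then _ else _) = _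
  rw [if_neg (show ¬(c.1 < m1.1 ∨ (c.1 = m1.1 ∧ c.2 < m1.2)) from h)]
  exact if_pos h2

theorem pvBStep_ge1_ge2 (m1 m2v : Int × String) (c : Int × String)
    (h : ¬ pvLt c m1) (h2 : ¬ pvLt c m2v) :
    pvBStep (some m1, some m2v) c = (some m1, some m2v) := by
  show (if c.1 < m1.1 ∨ (c.1 = m1.1 ∧ c.2 < m1.2) then _ else _) = _
  rw [if_neg (show ¬(c.1 < m1.1 ∨ (c.1 = m1.1 ∧ c.2 < m1.2)) from h)]
  exact if_neg h2

-- invariant of B's scan: m1 is the strict minimum of the elements seen, m2 the second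
def pvGood (cs : List (Int × String)) (s : Option (Int × String) × Option (Int × String)) : Prop :=
  (cs = [] ∧ s = (none, none)) ∨
  (∃ m1, s.1 = some m1 ∧ m1 ∈ cs ∧ (∀ c ∈ cs, c ≠ m1 → pvLt m1 c) ∧
    ((s.2 = none ∧ ∀ c ∈ cs, c = m1) ∨
     (∃ m2, s.2 = some m2 ∧ m2 ∈ cs ∧ m2 ≠ m1 ∧ ∀ c ∈ cs, c ≠ m1 → c ≠ m2 → pvLt m2 c)))

theorem pvBStep_good (cs : List (Int × String)) (s : Option (Int × String) × Option (Int × String))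
    (c : Int × String) (hg : pvGood cs s) (hc : c ∉ cs) : pvGood (cs ++ [c]) (pvBStep s c) := by
  obtain ⟨s1, s2⟩ := s
  rcases hg with ⟨rfl, hs⟩ | ⟨m1, hs1, hm1, hmin1, hrest⟩
  · cases hs
    rw [pvBStep_none]
    refine Or.inr ⟨c, rfl, by simp, ?_, Or.inl ⟨rfl, by simp⟩⟩
    intro x hx hne
    simp only [List.nil_append, List.mem_singleton] at hx
    exact absurd hx hne
  · simp only at hs1
    subst hs1
    have hcm1 : c ≠ m1 := fun h => hc (h ▸ hm1)
    by_cases hlt1 : pvLt c m1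
    · -- c becomes the new minimum, old m1 the second
      rw [pvBStep_lt1 _ _ _ hlt1]
      refine Or.inr ⟨c, rfl, by simp, ?_, Or.inr ⟨m1, rfl, by simp [hm1], hcm1.symm, ?_⟩⟩
      · intro x hx hne
        rcases List.mem_append.1 hx with hx | hx
        · by_cases hxm : x = m1
          · exact hxm ▸ hlt1
          · exact pvLt_trans hlt1 (hmin1 x hx hxm)
        · exact absurd (List.mem_singleton.1 hx) hne
      · intro x hx hne1 hnem1
        rcases List.mem_append.1 hx with hx | hx
        · exact hmin1 x hx hnem1
        · exact absurd (List.mem_singleton.1 hx) hne1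
    · have hm1c : pvLt m1 c := (pvLt_total hcm1).resolve_left hlt1
      rcases hrest with ⟨hs2, hall⟩ | ⟨m2, hs2, hm2, hm2ne, hmin2⟩
      · simp only at hs2; subst hs2
        rw [pvBStep_ge1_none _ _ hlt1]
        refine Or.inr ⟨m1, rfl, List.mem_append_left _ hm1, ?_, Or.inr ⟨c, rfl, by simp, hcm1, ?_⟩⟩
        · intro x hx hne
          rcases List.mem_append.1 hx with hx | hx
          · exact absurd (hall x hx) hne
          · exact (List.mem_singleton.1 hx) ▸ hm1c
        · intro x hx hnem1 hnec
          rcases List.mem_append.1 hx with hx | hx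
          · exact absurd (hall x hx) hnem1
          · exact absurd (List.mem_singleton.1 hx) hnec
      · simp only at hs2; subst hs2
        have hcm2 : c ≠ m2 := fun h => hc (h ▸ hm2)
        by_cases hlt2 : pvLt c m2
        · rw [pvBStep_ge1_lt2 _ _ _ hlt1 hlt2]
          refine Or.inr ⟨m1, rfl, List.mem_append_left _ hm1, ?_, Or.inr ⟨c, rfl, by simp, hcm1, ?_⟩⟩
          · intro x hx hne
            rcases List.mem_append.1 hx with hx | hx
            · exact hmin1 x hx hne
            · exact (List.mem_singleton.1 hx) ▸ hm1c
          · intro x hx hnem1 hnec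
            rcases List.mem_append.1 hx with hx | hx
            · by_cases hxm : x = m2
              · exact hxm ▸ hlt2
              · exact pvLt_trans hlt2 (hmin2 x hx hnem1 hxm)
            · exact absurd (List.mem_singleton.1 hx) hnec
        · have hm2c : pvLt m2 c := (pvLt_total hcm2).resolve_left hlt2
          rw [pvBStep_ge1_ge2 _ _ _ hlt1 hlt2]
          refine Or.inr ⟨m1, rfl, List.mem_append_left _ hm1, ?_,
            Or.inr ⟨m2, rfl, List.mem_append_left _ hm2, hm2ne, ?_⟩⟩
          · intro x hx hne
            rcases List.mem_append.1 hx with hx | hx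
            · exact hmin1 x hx hne
            · exact (List.mem_singleton.1 hx) ▸ hm1c
          · intro x hx hnem1 hnem2
            rcases List.mem_append.1 hx with hx | hx
            · exact hmin2 x hx hnem1 hnem2
            · exact (List.mem_singleton.1 hx) ▸ hm2c

theorem pvGood_foldl (cs : List (Int × String)) (hnd : cs.Nodup) :
    pvGood cs (cs.foldl pvBStep (none, none)) := by
  induction cs using List.reverseRecOn with
  | nil => exact Or.inl ⟨rfl, rfl⟩
  | append_singleton cs c ih =>
    rw [List.nodup_append] at hnd
    rw [List.foldl_append, List.foldl_cons, List.foldl_nil]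
    exact pvBStep_good cs _ c (ih hnd.1) (fun hmem => hnd.2.2 c hmem c (by simp) rfl)

-- the heart of the equivalence, over an item list with distinct keys
theorem core_eq (xs : List (String × Int)) (hnd : (xs.map Prod.fst).Nodup) (hlen : 2 ≤ xs.length) :
    (match PySem.List.sorted (PySem.List.sorted2 xs (fun t => t.1) (fun t => t.2)) (fun t => t.2) with
     | a :: b :: _ => (a.1, b.1)
     | _ => ("", ""))
    = (match xs.foldl (fun st p => pvBStep st (p.2, p.1)) (none, none) with
       | (some m1, some m2) => (m1.2, m2.2)
       | _ => ("", "")) := by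
  -- the sorted chain
  have hperm : (PySem.List.sorted (PySem.List.sorted2 xs (fun t => t.1) (fun t => t.2)) (fun t => t.2)).Perm xs :=
    (PySem.List.sorted_perm _ _ _).trans (PySem.List.sorted2_perm _ _ _ _)
  have hxsnd : xs.Nodup := List.Nodup.of_map _ hnd
  have hLnd : (PySem.List.sorted (PySem.List.sorted2 xs (fun t => t.1) (fun t => t.2)) (fun t => t.2)).Nodup :=
    hperm.nodup_iff.2 hxsnd
  have hLpw : (PySem.List.sorted (PySem.List.sorted2 xs (fun t => t.1) (fun t => t.2)) (fun t => t.2)).Pairwise pvVK := by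
    rw [PySem.List.sorted_eq_foldl_insertBy]
    apply pw2
    · simp
    · rw [sorted2_eq_foldl]
      exact pw1 xs [] (by simp) (by simp) hnd
    · simp
  have hlenL : 2 ≤ (PySem.List.sorted (PySem.List.sorted2 xs (fun t => t.1) (fun t => t.2)) (fun t => t.2)).length := by
    rw [hperm.length_eq]; exact hlen
  obtain ⟨a, b, t, hL⟩ := pv_exists_two _ hlenL
  rw [hL] at hperm hLnd hLpw
  rw [List.nodup_cons, List.nodup_cons] at hLnd
  rw [List.pairwise_cons, List.pairwise_cons] at hLpw
  have hab : a ≠ b := fun h => hLnd.1 (h ▸ List.mem_cons_self ..)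
  -- the scan, over the flipped pairs
  have hfold : xs.foldl (fun st p => pvBStep st (p.2, p.1)) (none, none)
      = (xs.map Prod.swap).foldl pvBStep (none, none) := List.foldl_map.symm
  have hcsnd : (xs.map Prod.swap).Nodup := by
    apply List.Nodup.of_map Prod.snd
    rw [List.map_map]
    exact hnd
  have hgood := pvGood_foldl (xs.map Prod.swap) hcsnd
  have hmema : a.swap ∈ xs.map Prod.swap :=
    List.mem_map_of_mem (hperm.mem_iff.1 (List.mem_cons_self ..))
  have hmemb : b.swap ∈ xs.map Prod.swap :=
    List.mem_map_of_mem (hperm.mem_iff.1 (List.mem_cons_of_mem _ (List.mem_cons_self ..)))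
  rcases hgood with ⟨hnil, _⟩ | ⟨m1, hs1, hm1, hmin1, hrest⟩
  · rw [hnil] at hmema; simp at hmema
  · rcases hrest with ⟨_, hall⟩ | ⟨m2, hs2, hm2, hm2ne, hmin2⟩
    · exact absurd ((hall _ hmema).trans (hall _ hmemb).symm)
        (fun h => hab (Prod.swap_injective h))
    · -- identify m1 with a.swap and m2 with b.swap
      have hm1a : m1 = a.swap := by
        by_contra hne
        have h1 : pvLt m1 a.swap := hmin1 _ hmema (fun h => hne h.symm)
        obtain ⟨y, hy, hysw⟩ := List.mem_map.1 hm1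
        have hya : y ≠ a := fun h => hne (by rw [← hysw, h])
        have hyL : y ∈ b :: t := by
          have hmem : y ∈ a :: b :: t := hperm.mem_iff.2 hy
          exact (List.mem_cons.1 hmem).resolve_left hya
        have h2 : pvLt a.swap m1 := hysw ▸ (hLpw.1 y hyL : pvLt a.swap y.swap)
        exact pvLt_asymm h1 h2
      have hm2b : m2 = b.swap := by
        by_contra hne
        have hbm1 : b.swap ≠ m1 := fun h => hab (Prod.swap_injective (h.trans hm1a)).symm
        have h1 : pvLt m2 b.swap := hmin2 _ hmemb hbm1 (fun h => hne h.symm)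
        obtain ⟨y, hy, hysw⟩ := List.mem_map.1 hm2
        have hya : y ≠ a := fun h => hm2ne (by rw [← hysw, h, ← hm1a])
        have hyb : y ≠ b := fun h => hne (by rw [← hysw, h])
        have hyt : y ∈ t := by
          have hmem : y ∈ a :: b :: t := hperm.mem_iff.2 hy
          exact ((List.mem_cons.1 ((List.mem_cons.1 hmem).resolve_left hya)).resolve_left hyb)
        have h2 : pvLt b.swap m2 := hysw ▸ (hLpw.2.1 y hyt : pvLt b.swap y.swap)
        exact pvLt_asymm h1 h2
      have hr : xs.foldl (fun st p => pvBStep st (p.2, p.1)) (none, none)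
          = (some a.swap, some b.swap) := by
        rw [hfold, ← hm1a, ← hm2b]
        exact Prod.ext hs1 hs2
      rw [hL, hr]
      rfl

-- ===== VERDICT (by name: the statement is the Claim_ definition above) =====
theorem best_two_keys_spec : Claim_equal_best_two_keys := by
  intro dict _ hpre
  unfold Pre_best_two_keys at hpre
  unfold Spec_best_two_keys best_two_keys best_two_keys_alt
  simp only []
  have hkeys : (PySem.Dict.ofList dict).keys.Nodup := PySem.Dict.nodup_keys_ofList dict
  have hnot : ¬ (PySem.Dict.ofList dict).size < 2 := not_lt.2 hpre
  rw [if_neg hnot, if_neg hnot]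
  have hmapkeys : (PySem.Dict.ofList dict).keys.map (fun k => (k, (PySem.Dict.ofList dict).getD k 0))
      = (PySem.Dict.ofList dict).items :=
    (PySem.Dict.items_eq_map_keys _ hkeys 0).symm
  rw [hmapkeys]
  have hkeq : (PySem.Dict.ofList dict).keys = (PySem.Dict.ofList dict).items.map Prod.fst := rfl
  rw [hkeq, List.foldl_map]
  rw [PySem.List.foldl_congr_mem _ _
      (fun st (p : String × Int) => pvBStep st (p.2, p.1)) _
      (fun acc p hp => by
        have hget : (PySem.Dict.ofList dict).getD p.1 0 = p.2 :=
          PySem.Dict.getD_of_mem_items _ (by simpa using hp) hkeys 0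
        rw [hget])]
  have hndk : ((PySem.Dict.ofList dict).items.map Prod.fst).Nodup := hkeq ▸ hkeys
  exact core_eq _ hndk hpre
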